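-- pv_equiv track=rewrite | github.com/Lamgera/prakt2 | visualizer.py | bfs_collect_edges
-- ===== SOURCE A (Python) =====
-- def bfs_collect_edges(graph, start_pkg, max_depth, filter_substring):
--     edges = set()
--     visited_global = set()
--
--     def visit(pkg, depth, path_set):
--         if depth > max_depth or pkg in path_set:
--             return
--         if pkg in visited_global and depth >= getattr(visit, '_depths', {}).get(pkg, max_depth + 1):
--             return
--
--         if not hasattr(visit, '_depths'):
--             visit._depths = {}
--         if pkg not in visit._depths or depth < visit._depths[pkg]:
--             visit._depths[pkg] = depth
--
--         visited_global.add(pkg)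
--
--         if pkg not in graph:
--             return
--
--         raw_deps = graph[pkg]
--         filtered_deps = [
--             d for d in raw_deps
--             if not filter_substring or filter_substring not in d
--         ]
--
--         for dep in filtered_deps:
--             edges.add((pkg, dep))
--
--         new_path = path_set | {pkg}
--         for dep in filtered_deps:
--             visit(dep, depth + 1, new_path)
--
--     visit(start_pkg, 0, set())
--     return edges
-- ===== SOURCE B (Python) =====
-- def bfs_collect_edges(graph, start_pkg, max_depth, filter_substring):
--     # Iterative depth-first search with an explicit stack and a single
--     # best-depth dict; no per-call path-set copies, no recursion, no
--     # function-attribute memo.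
--     edges = set()
--     best = {}
--     stack = [(start_pkg, 0)]
--     while stack:
--         pkg, depth = stack.pop()
--         if depth > max_depth or (pkg in best and depth >= best[pkg]):
--             continue
--         best[pkg] = depth
--         if pkg not in graph:
--             continue
--         deps = [d for d in graph[pkg]
--                 if not filter_substring or filter_substring not in d]
--         for dep in deps:
--             edges.add((pkg, dep))
--         for dep in reversed(deps):
--             stack.append((dep, depth + 1))
--     return edges
-- ===== Notes on version B (the rewrite author's own statement) =====
-- stated objective: alternative
-- what changed: Replaces A's recursive DFS that carries a copied path-set per call plus a visited set and a function-attribute depth memo by an iterative explicit-stack traversal with one best-depth dict (the path-set check is proved redundant given the memo), dropping the per-call set copies, the recursion and the getattr/hasattr machinery.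
import Mathlib
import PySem

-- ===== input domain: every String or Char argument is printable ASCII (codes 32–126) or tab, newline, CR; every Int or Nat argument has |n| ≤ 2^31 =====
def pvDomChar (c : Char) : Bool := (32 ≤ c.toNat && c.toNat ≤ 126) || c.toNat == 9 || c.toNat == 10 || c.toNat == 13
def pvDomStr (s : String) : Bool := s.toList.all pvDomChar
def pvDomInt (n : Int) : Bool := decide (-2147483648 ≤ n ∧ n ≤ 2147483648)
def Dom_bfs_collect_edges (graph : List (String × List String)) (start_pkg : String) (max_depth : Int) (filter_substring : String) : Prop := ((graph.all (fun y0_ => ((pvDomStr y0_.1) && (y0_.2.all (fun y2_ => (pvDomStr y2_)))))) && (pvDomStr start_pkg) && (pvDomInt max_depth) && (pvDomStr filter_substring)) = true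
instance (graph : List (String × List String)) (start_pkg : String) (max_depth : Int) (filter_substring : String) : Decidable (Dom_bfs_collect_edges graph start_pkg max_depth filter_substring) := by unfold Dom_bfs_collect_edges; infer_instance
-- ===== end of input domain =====

-- B replaces A's recursive DFS (per-call copied path-set, visited set + function-attribute
-- depth memo) by an iterative explicit-stack traversal with a single best-depth dict.

-- ===== PORT A =====
-- A's recursive `visit` (the inner for-loop over filtered deps is `visitListA`);
-- state tuple = (edges, visited_global, visit._depths).
mutual
def visitA (graph : List (String × List String)) (maxd : Int) (fs : String)
    (pkg : String) (depth : Int) (path : PySem.Set String)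
    (edges : PySem.Set (String × String)) (visited : PySem.Set String)
    (depths : PySem.Dict String Int) :
    PySem.Set (String × String) × PySem.Set String × PySem.Dict String Int :=
  if depth > maxd ∨ PySem.Set.contains path pkg then (edges, visited, depths)
  else if PySem.Set.contains visited pkg ∧ depth ≥ PySem.Dict.getD depths pkg (maxd + 1) then
    (edges, visited, depths)
  else
    let depths1 := if ¬ PySem.Dict.contains depths pkg ∨ depth < PySem.Dict.getD depths pkg 0
                   then PySem.Dict.insert depths pkg depth else depths
    let visited1 := PySem.Set.add visited pkg
    match (PySem.Dict.mk graph).get? pkg with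
    | none => (edges, visited1, depths1)
    | some raw_deps =>
      let filtered := raw_deps.filter (fun d => fs == "" || !(PySem.Str.isIn fs d))
      let edges1 := filtered.foldl (fun e d => PySem.Set.add e (pkg, d)) edges
      let new_path := PySem.Set.union path [pkg]
      visitListA graph maxd fs filtered (depth + 1) new_path edges1 visited1 depths1
termination_by ((maxd + 1 - depth).toNat, 0)
decreasing_by simp_wf; left; omega

def visitListA (graph : List (String × List String)) (maxd : Int) (fs : String)
    (deps : List String) (depth : Int) (path : PySem.Set String)
    (edges : PySem.Set (String × String)) (visited : PySem.Set String)
    (depths : PySem.Dict String Int) :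
    PySem.Set (String × String) × PySem.Set String × PySem.Dict String Int :=
  match deps with
  | [] => (edges, visited, depths)
  | d :: rest =>
    let st := visitA graph maxd fs d depth path edges visited depths
    visitListA graph maxd fs rest depth path st.1 st.2.1 st.2.2
termination_by ((maxd + 1 - depth).toNat, deps.length + 1)
decreasing_by
  · simp_wf; right; omega
  · simp_wf; right; omega
end

def bfs_collect_edges (graph : List (String × List String)) (start_pkg : String) (max_depth : Int) (filter_substring : String) : List (String × String) :=
  (visitA graph max_depth filter_substring start_pkg 0 PySem.Set.empty PySem.Set.empty PySem.Set.empty PySem.Dict.empty).1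

-- ===== PORT B =====
-- termination measure for B's while-loop: each stack entry at depth d weighs W^(maxd+1-d)
-- where W exceeds every adjacency-list length, so a pop strictly shrinks the total.
def pvMaxDeps (graph : List (String × List String)) : Nat :=
  graph.foldl (fun m p => max m p.2.length) 0

def pvW (graph : List (String × List String)) : Nat := pvMaxDeps graph + 2

def pvMeasure (graph : List (String × List String)) (maxd : Int) (stack : List (String × Int)) : Nat :=
  (stack.map (fun p => pvW graph ^ (maxd + 1 - p.2).toNat)).sum

theorem pv_mem_of_get? (l : List (String × List String)) (k : String) (v : List String)
    (h : (PySem.Dict.mk l).get? k = some v) : (k, v) ∈ l := by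
  induction l with
  | nil => simp [PySem.Dict.get?] at h
  | cons p t ih =>
    obtain ⟨a, b⟩ := p
    rw [PySem.Dict.get?_mk_cons] at h
    by_cases hk : a == k
    · simp only [hk, if_pos] at h
      simp at hk h
      simp [hk, h]
    · simp only [hk, Bool.false_eq_true, if_false] at h
      exact List.mem_cons_of_mem _ (ih h)

theorem pv_foldl_max_init_le (l : List (String × List String)) (init : Nat) :
    init ≤ l.foldl (fun m q => max m q.2.length) init := by
  induction l generalizing init with
  | nil => simp
  | cons r s ih => exact le_trans (le_max_left _ _) (ih _)

theorem pv_le_maxDeps (graph : List (String × List String)) (p : String × List String)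
    (h : p ∈ graph) : p.2.length ≤ pvMaxDeps graph := by
  unfold pvMaxDeps
  suffices H : ∀ (init : Nat) (l : List (String × List String)), p ∈ l →
      p.2.length ≤ l.foldl (fun m q => max m q.2.length) init from H 0 graph h
  intro init l hl
  induction l generalizing init with
  | nil => simp at hl
  | cons q t ih =>
    rcases List.mem_cons.mp hl with hq | hl
    · subst hq
      simp only [List.foldl_cons]
      exact le_trans (le_max_right _ _) (pv_foldl_max_init_le t _)
    · exact ih _ hl

theorem pv_push_eq (deps : List String) (depth : Int) (rest : List (String × Int)) :
    deps.reverse.foldl (fun st d => (d, depth + 1) :: st) rest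
      = deps.map (fun d => (d, depth + 1)) ++ rest := by
  induction deps generalizing rest with
  | nil => rfl
  | cons d t ih =>
    simp only [List.reverse_cons, List.foldl_append, List.foldl_cons, List.foldl_nil, List.map_cons]
    rw [ih]; simp

theorem pv_sum_const {α : Type} (l : List α) (c : Nat) :
    (l.map (fun _ => c)).sum = l.length * c := by
  induction l with
  | nil => simp
  | cons x t _ => simp [Nat.succ_mul, Nat.add_comm]

-- B's while-loop: pop (pkg, depth) from the stack top (list head), prune by the best-depth
-- dict, otherwise record depth, emit the filtered edges and push the filtered deps.
def runB (graph : List (String × List String)) (maxd : Int) (fs : String)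
    (stack : List (String × Int)) (edges : PySem.Set (String × String))
    (best : PySem.Dict String Int) : PySem.Set (String × String) :=
  match stack with
  | [] => edges
  | (pkg, depth) :: rest =>
    if depth > maxd ∨ (PySem.Dict.contains best pkg ∧ depth ≥ PySem.Dict.getD best pkg 0) then
      runB graph maxd fs rest edges best
    else
      let best1 := PySem.Dict.insert best pkg depth
      match hget : (PySem.Dict.mk graph).get? pkg with
      | none => runB graph maxd fs rest edges best1
      | some raw_deps =>
        let deps := raw_deps.filter (fun d => fs == "" || !(PySem.Str.isIn fs d))
        let edges1 := deps.foldl (fun e d => PySem.Set.add e (pkg, d)) edges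
        runB graph maxd fs (deps.reverse.foldl (fun st d => (d, depth + 1) :: st) rest) edges1 best1
termination_by pvMeasure graph maxd stack
decreasing_by
  · unfold pvMeasure
    simp only [List.map_cons, List.sum_cons]
    have : 0 < pvW graph ^ (maxd + 1 - depth).toNat := Nat.pow_pos (by unfold pvW; omega)
    omega
  · unfold pvMeasure
    simp only [List.map_cons, List.sum_cons]
    have : 0 < pvW graph ^ (maxd + 1 - depth).toNat := Nat.pow_pos (by unfold pvW; omega)
    omega
  · rw [pv_push_eq]
    unfold pvMeasure
    simp only [List.map_cons, List.sum_cons, List.map_append, List.sum_append, List.map_map]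
    have hk : (maxd + 1 - depth).toNat = (maxd + 1 - (depth + 1)).toNat + 1 := by omega
    set L := (raw_deps.filter (fun d => fs == "" || !(PySem.Str.isIn fs d))) with hL
    have hlen : L.length < pvW graph := by
      have h1 : L.length ≤ raw_deps.length := hL ▸ List.length_filter_le _ _
      have h2 : raw_deps.length ≤ pvMaxDeps graph :=
        pv_le_maxDeps graph (pkg, raw_deps) (pv_mem_of_get? graph pkg raw_deps hget)
      unfold pvW; omega
    have hsum : (L.map ((fun p => pvW graph ^ (maxd + 1 - p.2).toNat) ∘ (fun d => (d, depth + 1)))).sum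
        = L.length * pvW graph ^ (maxd + 1 - (depth + 1)).toNat := by
      have : (L.map ((fun p => pvW graph ^ (maxd + 1 - p.2).toNat) ∘ (fun d => (d, depth + 1))))
          = L.map (fun _ => pvW graph ^ (maxd + 1 - (depth + 1)).toNat) := rfl
      rw [this, pv_sum_const]
    rw [hsum, hk]
    have hmul : L.length * pvW graph ^ (maxd + 1 - (depth + 1)).toNat
        < pvW graph ^ ((maxd + 1 - (depth + 1)).toNat + 1) := by
      rw [pow_succ]
      calc L.length * pvW graph ^ (maxd + 1 - (depth + 1)).toNat
          < pvW graph * pvW graph ^ (maxd + 1 - (depth + 1)).toNat :=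
            (Nat.mul_lt_mul_right (Nat.pow_pos (show 0 < pvW graph by unfold pvW; omega))).mpr hlen
        _ = _ := Nat.mul_comm _ _
    omega

def bfs_collect_edges_alt (graph : List (String × List String)) (start_pkg : String) (max_depth : Int) (filter_substring : String) : List (String × String) :=
  runB graph max_depth filter_substring [(start_pkg, 0)] PySem.Set.empty PySem.Dict.empty

-- ===== PRECONDITION & SPEC =====
def Spec_bfs_collect_edges (graph : List (String × List String)) (start_pkg : String) (max_depth : Int) (filter_substring : String) (out : List (String × String)) : Prop := out = bfs_collect_edges_alt graph start_pkg max_depth filter_substring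
instance (graph : List (String × List String)) (start_pkg : String) (max_depth : Int) (filter_substring : String) (out : List (String × String)) : Decidable (Spec_bfs_collect_edges graph start_pkg max_depth filter_substring out) := by unfold Spec_bfs_collect_edges; infer_instance

-- ===== CLAIM (what is proved, stated in full; the proofs are below) =====
def Claim_equal_bfs_collect_edges : Prop := ∀ (graph : List (String × List String)) (start_pkg : String) (max_depth : Int) (filter_substring : String), Dom_bfs_collect_edges graph start_pkg max_depth filter_substring → Spec_bfs_collect_edges graph start_pkg max_depth filter_substring (bfs_collect_edges graph start_pkg max_depth filter_substring)

-- ===== LEMMAS AND PROOFS =====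

-- visited_global holds exactly the keys of the depth memo
def pvInvVK (visited : PySem.Set String) (depths : PySem.Dict String Int) : Prop :=
  ∀ q, PySem.Set.contains visited q = PySem.Dict.contains depths q

-- every node on the current recursion path is in the memo with a strictly smaller depth
def pvInvPath (path : PySem.Set String) (depths : PySem.Dict String Int) (depth : Int) : Prop :=
  ∀ q ∈ path, ∃ dv, depths.get? q = some dv ∧ dv < depth

-- the memo only ever gains keys and decreases values
def pvMono (d d' : PySem.Dict String Int) : Prop :=
  ∀ q dv, d.get? q = some dv → ∃ dv', d'.get? q = some dv' ∧ dv' ≤ dv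

theorem pvMono_refl (d : PySem.Dict String Int) : pvMono d d :=
  fun _ dv h => ⟨dv, h, le_refl _⟩

theorem pvMono_trans {a b c : PySem.Dict String Int} (h1 : pvMono a b) (h2 : pvMono b c) :
    pvMono a c := by
  intro q dv h
  obtain ⟨dv', h', hle'⟩ := h1 q dv h
  obtain ⟨dv'', h'', hle''⟩ := h2 q dv' h'
  exact ⟨dv'', h'', le_trans hle'' hle'⟩

theorem pvInvPath_mono {path : PySem.Set String} {d d' : PySem.Dict String Int} {depth : Int}
    (hp : pvInvPath path d depth) (hm : pvMono d d') : pvInvPath path d' depth := by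
  intro q hq
  obtain ⟨dv, hget, hlt⟩ := hp q hq
  obtain ⟨dv', hget', hle⟩ := hm q dv hget
  exact ⟨dv', hget', lt_of_le_of_lt hle hlt⟩

-- simulation statement for one call of A's `visit` against B's loop
def pvLA (graph : List (String × List String)) (maxd : Int) (fs : String) (k : Nat) : Prop :=
  ∀ depth : Int, (maxd + 1 - depth).toNat = k →
  ∀ (pkg : String) (path : PySem.Set String) (edges : PySem.Set (String × String))
    (visited : PySem.Set String) (depths : PySem.Dict String Int) (rest : List (String × Int)),
    pvInvVK visited depths → pvInvPath path depths depth →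
    runB graph maxd fs ((pkg, depth) :: rest) edges depths
      = runB graph maxd fs rest
          (visitA graph maxd fs pkg depth path edges visited depths).1
          (visitA graph maxd fs pkg depth path edges visited depths).2.2
    ∧ pvInvVK (visitA graph maxd fs pkg depth path edges visited depths).2.1
        (visitA graph maxd fs pkg depth path edges visited depths).2.2
    ∧ pvMono depths (visitA graph maxd fs pkg depth path edges visited depths).2.2

-- simulation statement for A's inner for-loop against B's pushed stack segment
def pvLLA (graph : List (String × List String)) (maxd : Int) (fs : String) (k : Nat) : Prop :=
  ∀ depth : Int, (maxd + 1 - depth).toNat = k →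
  ∀ (deps : List String) (path : PySem.Set String) (edges : PySem.Set (String × String))
    (visited : PySem.Set String) (depths : PySem.Dict String Int) (rest : List (String × Int)),
    pvInvVK visited depths → pvInvPath path depths depth →
    runB graph maxd fs (deps.map (fun d => (d, depth)) ++ rest) edges depths
      = runB graph maxd fs rest
          (visitListA graph maxd fs deps depth path edges visited depths).1
          (visitListA graph maxd fs deps depth path edges visited depths).2.2
    ∧ pvInvVK (visitListA graph maxd fs deps depth path edges visited depths).2.1
        (visitListA graph maxd fs deps depth path edges visited depths).2.2
    ∧ pvMono depths (visitListA graph maxd fs deps depth path edges visited depths).2.2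

theorem pv_runB_nil (graph : List (String × List String)) (maxd : Int) (fs : String)
    (edges : PySem.Set (String × String)) (best : PySem.Dict String Int) :
    runB graph maxd fs [] edges best = edges := by rw [runB]

theorem pv_la_zero (graph : List (String × List String)) (maxd : Int) (fs : String) :
    pvLA graph maxd fs 0 := by
  intro depth hk pkg path edges visited depths rest hvk _
  have hd : depth > maxd := by omega
  have hA : visitA graph maxd fs pkg depth path edges visited depths = (edges, visited, depths) := by
    rw [visitA]; simp [hd]
  rw [hA]
  refine ⟨?_, hvk, pvMono_refl depths⟩
  rw [runB]
  simp [hd]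

theorem pv_lla_of_la (graph : List (String × List String)) (maxd : Int) (fs : String) (k : Nat)
    (hla : pvLA graph maxd fs k) : pvLLA graph maxd fs k := by
  intro depth hk deps
  induction deps with
  | nil =>
    intro path edges visited depths rest hvk hp
    have hL : visitListA graph maxd fs [] depth path edges visited depths
        = (edges, visited, depths) := by rw [visitListA]
    rw [hL]
    exact ⟨by simp, hvk, pvMono_refl depths⟩
  | cons d tl ih =>
    intro path edges visited depths rest hvk hp
    obtain ⟨heq1, hvk1, hmono1⟩ := hla depth hk d path edges visited depths
      (tl.map (fun d => (d, depth)) ++ rest) hvk hp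
    set st := visitA graph maxd fs d depth path edges visited depths with hst
    have hp1 : pvInvPath path st.2.2 depth := pvInvPath_mono hp hmono1
    obtain ⟨heq2, hvk2, hmono2⟩ := ih path st.1 st.2.1 st.2.2 rest hvk1 hp1
    have hL : visitListA graph maxd fs (d :: tl) depth path edges visited depths
        = visitListA graph maxd fs tl depth path st.1 st.2.1 st.2.2 := by
      rw [visitListA]
    rw [hL]
    refine ⟨?_, hvk2, pvMono_trans hmono1 hmono2⟩
    calc runB graph maxd fs ((d :: tl).map (fun d => (d, depth)) ++ rest) edges depths
        = runB graph maxd fs ((d, depth) :: (tl.map (fun d => (d, depth)) ++ rest)) edges depths := by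
          simp
      _ = runB graph maxd fs (tl.map (fun d => (d, depth)) ++ rest) st.1 st.2.2 := heq1
      _ = _ := heq2

theorem pv_getD_eq_of_contains (d : PySem.Dict String Int) (k : String) (a b : Int)
    (hc : d.contains k = true) : d.getD k a = d.getD k b := by
  rw [PySem.Dict.contains_eq_isSome_get?] at hc
  cases hg : d.get? k with
  | none => rw [hg] at hc; simp at hc
  | some v => rw [PySem.Dict.getD_eq_get?_getD, PySem.Dict.getD_eq_get?_getD, hg]; rfl

theorem pvInvVK_insert {visited : PySem.Set String} {depths : PySem.Dict String Int}
    (hvk : pvInvVK visited depths) (pkg : String) (depth : Int) :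
    pvInvVK (PySem.Set.add visited pkg) (depths.insert pkg depth) := by
  intro q
  rw [Bool.eq_iff_iff, PySem.Set.contains_iff, PySem.Set.mem_add, PySem.Dict.contains_insert]
  have h1 : q ∈ visited ↔ depths.contains q = true := by rw [← PySem.Set.contains_iff, hvk q]
  simp only [h1, Bool.or_eq_true, beq_iff_eq]
  tauto

theorem pvMono_insert {depths : PySem.Dict String Int} {pkg : String} {depth : Int}
    (h : depths.contains pkg = true → depth < depths.getD pkg 0) :
    pvMono depths (depths.insert pkg depth) := by
  intro q dv hq
  by_cases hqp : q = pkg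
  · subst hqp
    have hc : depths.contains q = true := by rw [PySem.Dict.contains_eq_isSome_get?, hq]; rfl
    have hlt := h hc
    rw [PySem.Dict.getD_eq_get?_getD, hq] at hlt
    exact ⟨depth, PySem.Dict.get?_insert_self _ _ _, le_of_lt hlt⟩
  · exact ⟨dv, by rw [PySem.Dict.get?_insert]; simp [hqp, hq], le_refl _⟩

theorem pvInvPath_push {path : PySem.Set String} {depths : PySem.Dict String Int}
    {pkg : String} {depth : Int} (hp : pvInvPath path depths depth) :
    pvInvPath (PySem.Set.union path [pkg]) (depths.insert pkg depth) (depth + 1) := by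
  intro q hq
  rw [PySem.Set.mem_union] at hq
  by_cases hqp : q = pkg
  · subst hqp; exact ⟨depth, PySem.Dict.get?_insert_self _ _ _, by omega⟩
  · rcases hq with hq | hq
    · obtain ⟨dv, hg, hlt⟩ := hp q hq
      exact ⟨dv, by rw [PySem.Dict.get?_insert]; simp [hqp, hg], by omega⟩
    · simp at hq; exact absurd hq hqp

theorem pv_la_succ (graph : List (String × List String)) (maxd : Int) (fs : String) (k : Nat)
    (hlla : pvLLA graph maxd fs k) : pvLA graph maxd fs (k + 1) := by
  intro depth hk pkg path edges visited depths rest hvk hp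
  have hdle : ¬ depth > maxd := by omega
  by_cases hBm : depths.contains pkg = true ∧ depth ≥ depths.getD pkg 0
  · -- both prune
    have hA : visitA graph maxd fs pkg depth path edges visited depths = (edges, visited, depths) := by
      rw [visitA]
      by_cases hpath : PySem.Set.contains path pkg = true
      · rw [if_pos (Or.inr hpath)]
      · have hv : PySem.Set.contains visited pkg = true := by rw [hvk pkg]; exact hBm.1
        have hgd : PySem.Dict.getD depths pkg (maxd + 1) = PySem.Dict.getD depths pkg 0 :=
          pv_getD_eq_of_contains _ _ _ _ hBm.1
        rw [if_neg (fun h => h.elim hdle hpath), if_pos ⟨hv, by rw [hgd]; exact hBm.2⟩]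
    rw [hA]
    refine ⟨?_, hvk, pvMono_refl depths⟩
    rw [runB]
    simp [hdle, hBm]
  · -- both expand
    have hBm' : depths.contains pkg = true → depth < depths.getD pkg 0 := by
      intro hc
      by_contra hge
      exact hBm ⟨hc, by omega⟩
    have hBc : ¬ (depth > maxd ∨ (PySem.Dict.contains depths pkg ∧ depth ≥ PySem.Dict.getD depths pkg 0)) := by
      rintro (h | h)
      · exact hdle h
      · exact hBm h
    have hpath : ¬ PySem.Set.contains path pkg = true := by
      intro hc
      have hmem : pkg ∈ path := (PySem.Set.contains_iff _ _).mp hc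
      obtain ⟨dv, hg, hlt⟩ := hp pkg hmem
      have hcont : depths.contains pkg = true := by rw [PySem.Dict.contains_eq_isSome_get?, hg]; rfl
      have hlt2 := hBm' hcont
      rw [PySem.Dict.getD_eq_get?_getD, hg] at hlt2
      simp at hlt2
      omega
    have hv2 : ¬ (PySem.Set.contains visited pkg = true ∧ depth ≥ PySem.Dict.getD depths pkg (maxd + 1)) := by
      rintro ⟨hv, hge⟩
      have hcont : depths.contains pkg = true := by rw [← hvk pkg]; exact hv
      rw [pv_getD_eq_of_contains _ _ (maxd + 1) 0 hcont] at hge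
      exact absurd (hBm' hcont) (by omega)
    have hd1 : ¬ PySem.Dict.contains depths pkg = true ∨ depth < PySem.Dict.getD depths pkg 0 := by
      by_cases hc : PySem.Dict.contains depths pkg = true
      · exact Or.inr (hBm' hc)
      · exact Or.inl hc
    have hmono0 : pvMono depths (depths.insert pkg depth) := pvMono_insert hBm'
    have hvk1 := pvInvVK_insert hvk pkg depth
    cases hg : (PySem.Dict.mk graph).get? pkg with
    | none =>
      have hA : visitA graph maxd fs pkg depth path edges visited depths
          = (edges, PySem.Set.add visited pkg, depths.insert pkg depth) := by
        rw [visitA, if_neg (fun h => h.elim hdle hpath), if_neg hv2]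
        simp only [hg, if_pos hd1]
      rw [hA]
      refine ⟨?_, hvk1, hmono0⟩
      rw [runB]
      rw [if_neg hBc]
      split
      · rfl
      · rename_i raw heq
        rw [hg] at heq
        simp at heq
    | some raw_deps =>
      have hA : visitA graph maxd fs pkg depth path edges visited depths
          = visitListA graph maxd fs (raw_deps.filter (fun d => fs == "" || !(PySem.Str.isIn fs d)))
              (depth + 1) (PySem.Set.union path [pkg])
              ((raw_deps.filter (fun d => fs == "" || !(PySem.Str.isIn fs d))).foldl
                (fun e d => PySem.Set.add e (pkg, d)) edges)
              (PySem.Set.add visited pkg) (depths.insert pkg depth) := by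
        rw [visitA, if_neg (fun h => h.elim hdle hpath), if_neg hv2]
        simp only [hg, if_pos hd1]
      rw [hA]
      obtain ⟨heq, hvk2, hmono2⟩ := hlla (depth + 1) (by omega)
        (raw_deps.filter (fun d => fs == "" || !(PySem.Str.isIn fs d)))
        (PySem.Set.union path [pkg])
        ((raw_deps.filter (fun d => fs == "" || !(PySem.Str.isIn fs d))).foldl
          (fun e d => PySem.Set.add e (pkg, d)) edges)
        (PySem.Set.add visited pkg) (depths.insert pkg depth) rest hvk1 (pvInvPath_push hp)
      refine ⟨?_, hvk2, pvMono_trans hmono0 hmono2⟩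
      rw [runB]
      rw [if_neg hBc]
      split
      · rename_i heq2
        rw [hg] at heq2
        simp at heq2
      · rename_i raw' heq2
        rw [hg] at heq2
        injection heq2 with h2
        subst h2
        simp only [pv_push_eq]
        exact heq

theorem pv_la_all (graph : List (String × List String)) (maxd : Int) (fs : String) (k : Nat) :
    pvLA graph maxd fs k := by
  induction k with
  | zero => exact pv_la_zero graph maxd fs
  | succ k ih => exact pv_la_succ graph maxd fs k (pv_lla_of_la graph maxd fs k ih)

-- ===== VERDICT (by name: the statement is the Claim_ definition above) =====
theorem bfs_collect_edges_spec : Claim_equal_bfs_collect_edges := by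
  intro graph start_pkg max_depth filter_substring _
  unfold Spec_bfs_collect_edges bfs_collect_edges bfs_collect_edges_alt
  have h := pv_la_all graph max_depth filter_substring ((max_depth + 1 - 0).toNat) 0 rfl
    start_pkg PySem.Set.empty PySem.Set.empty PySem.Set.empty PySem.Dict.empty []
    (by intro q; rfl) (by intro q hq; simp [PySem.Set.empty] at hq)
  rw [h.1, pv_runB_nil]
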